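-- pv_equiv track=rewrite | github.com/olamberti/advent-of-code | 2015/d05.py | is_nice_p2
-- ===== SOURCE A (Python) =====
-- def is_nice_p2(s):
--     # 1st rule
--     twice = False
--     for i in range(len(s) - 1):
--         c1, c2 = s[i], s[i + 1]
--         for j in range(len(s) - 1):
--             if abs(i - j) < 2: continue
--             d1, d2 = s[j], s[j + 1]
--             if c1 + c2 == d1 + d2:
--                 twice = True
--     # 2nd rule
--     repeat = False
--     for i in range(len(s) - 2):
--         c1, c3 = s[i], s[i + 2]
--         if c1 == c3: repeat = True
--     if twice and repeat: return True
--     return False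
-- ===== SOURCE B (Python) =====
-- def is_nice_p2(s):
--     # 1st rule: one pass; 'seen' holds every pair whose index is <= j - 2,
--     # so a hit is exactly a non-overlapping repeated pair.
--     n = len(s)
--     seen = set()
--     twice = False
--     for j in range(n - 1):
--         if j >= 2:
--             seen.add((s[j - 2], s[j - 1]))
--         if (s[j], s[j + 1]) in seen:
--             twice = True
--     # 2nd rule: zip the string against itself shifted by two
--     repeat = any(a == c for a, c in zip(s, s[2:]))
--     return twice and repeat
-- ===== Notes on version B (the rewrite author's own statement) =====
-- stated objective: faster
-- what changed: Replaces A's quadratic double loop over all pair positions with a single pass keeping a set of the pairs seen at least two positions back, and checks the letter-repeat rule by zipping the string against itself shifted by two.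
import Mathlib
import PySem

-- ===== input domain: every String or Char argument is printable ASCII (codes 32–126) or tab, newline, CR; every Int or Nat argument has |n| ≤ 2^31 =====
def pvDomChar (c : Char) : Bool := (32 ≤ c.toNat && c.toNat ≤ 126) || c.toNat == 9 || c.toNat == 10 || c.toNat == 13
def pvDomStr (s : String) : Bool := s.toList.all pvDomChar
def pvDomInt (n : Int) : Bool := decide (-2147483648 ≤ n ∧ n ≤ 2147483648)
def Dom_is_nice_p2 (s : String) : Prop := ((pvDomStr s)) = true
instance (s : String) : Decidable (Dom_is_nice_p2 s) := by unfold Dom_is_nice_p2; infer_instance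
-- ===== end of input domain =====

-- B replaces A's quadratic double loop by a single pass with a set of earlier pairs (faster in a timing run).


-- ===== PORT A =====
-- literal transliteration; s[i] → pyGetD on the char list (indices produced by range are in range);
-- 'c1 + c2 == d1 + d2' on one-char strings is compared as the two char lists [c1, c2] = [d1, d2]
def is_nice_p2 (s : String) : Bool :=
  let cs := s.toList
  let n : Int := cs.length
  let twice := (PySem.List.pyRange 0 (n - 1) 1).foldl (fun twice i =>
    let c1 := PySem.List.pyGetD cs i ' '
    let c2 := PySem.List.pyGetD cs (i + 1) ' '
    (PySem.List.pyRange 0 (n - 1) 1).foldl (fun twice j =>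
      if |i - j| < 2 then twice
      else
        let d1 := PySem.List.pyGetD cs j ' '
        let d2 := PySem.List.pyGetD cs (j + 1) ' '
        if [c1, c2] = [d1, d2] then true else twice) twice) false
  let rep := (PySem.List.pyRange 0 (n - 2) 1).foldl (fun rep i =>
    let c1 := PySem.List.pyGetD cs i ' '
    let c3 := PySem.List.pyGetD cs (i + 2) ' '
    if c1 = c3 then true else rep) false
  if twice && rep then true else false

-- ===== PORT B =====
-- loop body of Source B's single pass (seen : set of pairs at indices ≤ j-2, twice flag)
def pvBStep (cs : List Char) (st : PySem.Set (Char × Char) × Bool) (j : Int) :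
    PySem.Set (Char × Char) × Bool :=
  let seen := if 2 ≤ j then
      PySem.Set.add st.1 (PySem.List.pyGetD cs (j - 2) ' ', PySem.List.pyGetD cs (j - 1) ' ')
    else st.1
  (seen,
   if PySem.Set.contains seen (PySem.List.pyGetD cs j ' ', PySem.List.pyGetD cs (j + 1) ' ')
   then true else st.2)

def is_nice_p2_alt (s : String) : Bool :=
  let cs := s.toList
  let n : Int := cs.length
  let st := (PySem.List.pyRange 0 (n - 1) 1).foldl (pvBStep cs) (PySem.Set.empty, false)
  let rep := (cs.zip (PySem.List.slice cs (some 2) none)).any (fun p => p.1 == p.2)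
  st.2 && rep

-- ===== PRECONDITION & SPEC =====
def Spec_is_nice_p2 (s : String) (out : Bool) : Prop := out = is_nice_p2_alt s
instance (s : String) (out : Bool) : Decidable (Spec_is_nice_p2 s out) := by unfold Spec_is_nice_p2; infer_instance

-- ===== CLAIM (what is proved, stated in full; the proofs are below) =====
def Claim_equal_is_nice_p2 : Prop := ∀ (s : String), Dom_is_nice_p2 s → Spec_is_nice_p2 s (is_nice_p2 s)

-- ===== LEMMAS AND PROOFS =====

def pvPair (cs : List Char) (k : Nat) : Char × Char := (cs.getD k ' ', cs.getD (k + 1) ' ')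

def pvTW (cs : List Char) : Prop :=
  ∃ i j : Nat, i + 2 ≤ j ∧ j + 1 < cs.length ∧ pvPair cs i = pvPair cs j

def pvRP (cs : List Char) : Prop :=
  ∃ i : Nat, i + 2 < cs.length ∧ cs.getD i ' ' = cs.getD (i + 2) ' '

lemma pvFoldlOr {α : Type} (f : Bool → α → Bool) (g : α → Bool)
    (hf : ∀ b x, f b x = (b || g x)) : ∀ (l : List α) (b : Bool), l.foldl f b = (b || l.any g) := by
  intro l
  induction l with
  | nil => simp
  | cons x t ih => intro b; simp [hf, ih, Bool.or_assoc]

lemma pvGetD_int (cs : List Char) (i : Int) (h : 0 ≤ i) :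
    PySem.List.pyGetD cs i ' ' = cs.getD i.toNat ' ' := by
  rw [show i = ((i.toNat : Nat) : Int) by omega, PySem.List.pyGetD_natCast]
  rfl

lemma pvRange_toNat (b : Int) :
    PySem.List.pyRange 0 b 1 = PySem.List.pyRange 0 ((b.toNat : Nat) : Int) 1 := by
  rw [PySem.List.pyRange_one, PySem.List.pyRange_one]
  congr 1
  congr 1
  omega

lemma pvA_rep_iff (cs : List Char) :
    ((PySem.List.pyRange 0 ((cs.length : Int) - 2) 1).foldl (fun rep i =>
      let c1 := PySem.List.pyGetD cs i ' '
      let c3 := PySem.List.pyGetD cs (i + 2) ' '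
      if c1 = c3 then true else rep) false = true) ↔ pvRP cs := by
  rw [pvFoldlOr _ (fun i => decide (PySem.List.pyGetD cs i ' ' = PySem.List.pyGetD cs (i + 2) ' '))
      (by intro b x; dsimp only; split_ifs <;> simp [*])]
  simp only [Bool.false_or, List.any_eq_true, PySem.List.mem_pyRange_one, decide_eq_true_eq]
  constructor
  · rintro ⟨i, ⟨h0, h1⟩, hc⟩
    rw [pvGetD_int _ _ h0, pvGetD_int _ _ (by omega),
        show (i + 2).toNat = i.toNat + 2 by omega] at hc
    exact ⟨i.toNat, by omega, hc⟩
  · rintro ⟨k, hk, he⟩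
    refine ⟨(k : Int), ⟨by positivity, by omega⟩, ?_⟩
    rw [pvGetD_int _ _ (by positivity), pvGetD_int _ _ (by positivity),
        show ((k : Int) + 2).toNat = k + 2 by omega, Int.toNat_natCast]
    exact he

lemma pvA_twice_iff (cs : List Char) :
    ((PySem.List.pyRange 0 ((cs.length : Int) - 1) 1).foldl (fun twice i =>
      let c1 := PySem.List.pyGetD cs i ' '
      let c2 := PySem.List.pyGetD cs (i + 1) ' '
      (PySem.List.pyRange 0 ((cs.length : Int) - 1) 1).foldl (fun twice j =>
        if |i - j| < 2 then twice
        else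
          let d1 := PySem.List.pyGetD cs j ' '
          let d2 := PySem.List.pyGetD cs (j + 1) ' '
          if [c1, c2] = [d1, d2] then true else twice) twice) false = true) ↔ pvTW cs := by
  rw [pvFoldlOr _ (fun i => (PySem.List.pyRange 0 ((cs.length : Int) - 1) 1).any (fun j =>
        (!decide (|i - j| < 2)) &&
        decide ([PySem.List.pyGetD cs i ' ', PySem.List.pyGetD cs (i + 1) ' ']
               = [PySem.List.pyGetD cs j ' ', PySem.List.pyGetD cs (j + 1) ' '])))
      (by
        intro b i
        rw [pvFoldlOr _ (fun j =>
          (!decide (|i - j| < 2)) &&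
          decide ([PySem.List.pyGetD cs i ' ', PySem.List.pyGetD cs (i + 1) ' ']
                 = [PySem.List.pyGetD cs j ' ', PySem.List.pyGetD cs (j + 1) ' ']))
          (by intro b' j; dsimp only; split_ifs <;> simp [*])])]
  simp only [Bool.false_or, List.any_eq_true, PySem.List.mem_pyRange_one, Bool.and_eq_true,
    Bool.not_eq_eq_eq_not, Bool.not_true, decide_eq_false_iff_not, decide_eq_true_eq,
    List.cons.injEq, and_true, not_lt]
  constructor
  · rintro ⟨i, ⟨hi0, hi1⟩, j, ⟨hj0, hj1⟩, habs, h1, h2⟩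
    rw [pvGetD_int _ _ hi0, pvGetD_int _ _ hj0] at h1
    rw [pvGetD_int _ _ (show (0:Int) ≤ i + 1 by omega), pvGetD_int _ _ (show (0:Int) ≤ j + 1 by omega),
        show (i + 1).toNat = i.toNat + 1 by omega, show (j + 1).toNat = j.toNat + 1 by omega] at h2
    rcases le_or_gt i j with hij | hij
    · refine ⟨i.toNat, j.toNat, by rw [abs_of_nonpos (by omega)] at habs; omega, by omega, ?_⟩
      simp only [pvPair, Prod.mk.injEq]
      exact ⟨h1, h2⟩
    · refine ⟨j.toNat, i.toNat, by rw [abs_of_nonneg (by omega)] at habs; omega, by omega, ?_⟩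
      simp only [pvPair, Prod.mk.injEq]
      exact ⟨h1.symm, h2.symm⟩
  · rintro ⟨i, j, hij, hj, hp⟩
    simp only [pvPair, Prod.mk.injEq] at hp
    refine ⟨(i : Int), ⟨by positivity, by omega⟩, (j : Int), ⟨by positivity, by omega⟩,
      by rw [abs_of_nonpos (by omega)]; omega, ?_, ?_⟩
    · rw [pvGetD_int _ _ (by positivity), pvGetD_int _ _ (by positivity),
          Int.toNat_natCast, Int.toNat_natCast]
      exact hp.1
    · rw [pvGetD_int _ _ (by positivity), pvGetD_int _ _ (by positivity),
          show ((i : Int) + 1).toNat = i + 1 by omega,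
          show ((j : Int) + 1).toNat = j + 1 by omega]
      exact hp.2

lemma pvA_iff (s : String) : is_nice_p2 s = true ↔ pvTW s.toList ∧ pvRP s.toList := by
  unfold is_nice_p2
  rw [← pvA_twice_iff s.toList, ← pvA_rep_iff s.toList]
  cases h1 : (PySem.List.pyRange 0 ((s.toList.length : Int) - 1) 1).foldl _ false <;>
  cases h2 : (PySem.List.pyRange 0 ((s.toList.length : Int) - 2) 1).foldl _ false <;>
  simp_all

lemma pvRangeSplit (t : Nat) :
    PySem.List.pyRange 0 ((t + 1 : Nat) : Int) 1 =
      PySem.List.pyRange 0 (t : Int) 1 ++ [(t : Int)] := by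
  rw [show ((t + 1 : Nat) : Int) = (t : Int) + 1 by push_cast; ring]
  exact PySem.List.pyRange_one_succ_right (by positivity)

lemma pvB_seen (cs : List Char) (t : Nat) : ∀ x : Char × Char,
    x ∈ ((PySem.List.pyRange 0 (t : Int) 1).foldl (pvBStep cs) (PySem.Set.empty, false)).1 ↔
      ∃ i : Nat, i + 3 ≤ t ∧ x = pvPair cs i := by
  induction t with
  | zero =>
    intro x
    rw [show ((0 : Nat) : Int) = 0 by norm_num, PySem.List.pyRange_one_eq_nil le_rfl]
    simp [PySem.Set.empty]
  | succ t ih =>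
    intro x
    rw [pvRangeSplit, List.foldl_append, List.foldl_cons, List.foldl_nil]
    by_cases h2 : 2 ≤ t
    · have g1 : PySem.List.pyGetD cs ((t : Int) - 2) ' ' = cs.getD (t - 2) ' ' := by
        rw [pvGetD_int _ _ (by omega), show ((t : Int) - 2).toNat = t - 2 by omega]
      have g2 : PySem.List.pyGetD cs ((t : Int) - 1) ' ' = cs.getD (t - 2 + 1) ' ' := by
        rw [pvGetD_int _ _ (by omega), show ((t : Int) - 1).toNat = t - 2 + 1 by omega]
      have hstep : ((pvBStep cs ((PySem.List.pyRange 0 (t : Int) 1).foldl (pvBStep cs)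
          (PySem.Set.empty, false)) (t : Int)).1 : List (Char × Char)) =
          PySem.Set.add ((PySem.List.pyRange 0 (t : Int) 1).foldl (pvBStep cs)
            (PySem.Set.empty, false)).1 (pvPair cs (t - 2)) := by
        rw [pvBStep, pvPair, ← g1, ← g2]
        simp only [if_pos (show (2 : Int) ≤ (t : Int) by exact_mod_cast h2)]
      rw [hstep, PySem.Set.mem_add, ih]
      constructor
      · rintro (⟨i, hi, rfl⟩ | rfl)
        · exact ⟨i, by omega, rfl⟩
        · exact ⟨t - 2, by omega, rfl⟩
      · rintro ⟨i, hi, rfl⟩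
        by_cases hit : i + 3 ≤ t
        · exact Or.inl ⟨i, hit, rfl⟩
        · right; rw [show i = t - 2 by omega]
    · have hstep : ((pvBStep cs ((PySem.List.pyRange 0 (t : Int) 1).foldl (pvBStep cs)
          (PySem.Set.empty, false)) (t : Int)).1 : List (Char × Char)) =
          ((PySem.List.pyRange 0 (t : Int) 1).foldl (pvBStep cs) (PySem.Set.empty, false)).1 := by
        rw [pvBStep]
        simp only [if_neg (show ¬ (2 : Int) ≤ (t : Int) by exact_mod_cast h2)]
      rw [hstep, ih]
      constructor
      · rintro ⟨i, hi, rfl⟩; exact ⟨i, by omega, rfl⟩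
      · rintro ⟨i, hi, rfl⟩; exact ⟨i, by omega, rfl⟩

lemma pvB_tw (cs : List Char) (t : Nat) :
    ((PySem.List.pyRange 0 (t : Int) 1).foldl (pvBStep cs) (PySem.Set.empty, false)).2 = true ↔
      ∃ i j : Nat, i + 2 ≤ j ∧ j < t ∧ pvPair cs i = pvPair cs j := by
  induction t with
  | zero =>
    rw [show ((0 : Nat) : Int) = 0 by norm_num, PySem.List.pyRange_one_eq_nil le_rfl]
    simp
  | succ t ih =>
    have hseen := pvB_seen cs (t + 1)
    rw [pvRangeSplit, List.foldl_append, List.foldl_cons, List.foldl_nil]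
    simp only [pvRangeSplit, List.foldl_append, List.foldl_cons, List.foldl_nil] at hseen
    set prev := (PySem.List.pyRange 0 (t : Int) 1).foldl (pvBStep cs) (PySem.Set.empty, false)
      with hprev
    have g3 : PySem.List.pyGetD cs (t : Int) ' ' = cs.getD t ' ' := by
      rw [pvGetD_int _ _ (by positivity), Int.toNat_natCast]
    have g4 : PySem.List.pyGetD cs ((t : Int) + 1) ' ' = cs.getD (t + 1) ' ' := by
      rw [pvGetD_int _ _ (by positivity), show ((t : Int) + 1).toNat = t + 1 by omega]
    have hstep : (pvBStep cs prev (t : Int)).2 =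
        if PySem.Set.contains (pvBStep cs prev (t : Int)).1 (pvPair cs t) then true
        else prev.2 := by
      rw [pvBStep, pvPair, ← g3, ← g4]
    rw [hstep]
    split_ifs with hc
    · simp only [true_iff]
      obtain ⟨i, hi, heq⟩ := (hseen _).mp ((PySem.Set.contains_iff _ _).mp hc)
      exact ⟨i, t, by omega, by omega, heq.symm⟩
    · rw [ih]
      constructor
      · rintro ⟨i, j, h1, h2, h3⟩
        exact ⟨i, j, h1, by omega, h3⟩
      · rintro ⟨i, j, h1, h2, h3⟩
        by_cases hjt : j < t
        · exact ⟨i, j, h1, hjt, h3⟩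
        · exfalso
          have hj : j = t := by omega
          subst hj
          exact hc ((PySem.Set.contains_iff _ _).mpr ((hseen _).mpr ⟨i, by omega, h3.symm⟩))

lemma pvB_iff (s : String) : is_nice_p2_alt s = true ↔ pvTW s.toList ∧ pvRP s.toList := by
  rw [show is_nice_p2_alt s =
      ((((PySem.List.pyRange 0 ((s.toList.length : Int) - 1) 1).foldl (pvBStep s.toList)
          (PySem.Set.empty, false)).2) &&
        ((s.toList.zip (PySem.List.slice s.toList (some 2) none)).any (fun p => p.1 == p.2)))
      from rfl]
  rw [Bool.and_eq_true]
  apply and_congr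
  · rw [pvRange_toNat, pvB_tw]
    constructor <;> rintro ⟨i, j, h1, h2, h3⟩ <;> exact ⟨i, j, h1, by omega, h3⟩
  · rw [PySem.List.slice_from s.toList (show (0:Int) ≤ 2 by norm_num), show ((2 : Int)).toNat = 2 from rfl,
      List.any_eq_true]
    constructor
    · rintro ⟨p, hp, hpe⟩
      obtain ⟨k, hk, rfl⟩ := List.mem_iff_getElem.mp hp
      have hk2 : k + 2 < s.toList.length := by
        have := hk
        simp only [List.length_zip, List.length_drop] at this
        omega
      refine ⟨k, hk2, ?_⟩
      rw [List.getD_eq_getElem _ _ (by omega), List.getD_eq_getElem _ _ (by omega)]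
      have := beq_iff_eq.mp hpe
      simpa [List.getElem_zip, List.getElem_drop, Nat.add_comm 2 k] using this
    · rintro ⟨k, hk2, he⟩
      have hk : k < (s.toList.zip (s.toList.drop 2)).length := by
        simp only [List.length_zip, List.length_drop]; omega
      refine ⟨(s.toList.zip (s.toList.drop 2))[k], List.getElem_mem hk, ?_⟩
      rw [List.getD_eq_getElem _ _ (by omega), List.getD_eq_getElem _ _ (by omega)] at he
      simpa [List.getElem_zip, List.getElem_drop, Nat.add_comm 2 k] using he

-- ===== VERDICT =====
theorem is_nice_p2_spec : Claim_equal_is_nice_p2 := by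
  intro s _
  unfold Spec_is_nice_p2
  have h := (pvA_iff s).trans (pvB_iff s).symm
  cases h1 : is_nice_p2 s <;> cases h2 : is_nice_p2_alt s <;> simp_all
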